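-- pv_equiv track=rewrite | github.com/mieumje/Python_Coding_Test | 알고리즘/0908/3.py | solution
-- ===== SOURCE A (Python) =====
-- def solution(numbers):
--     answer = []
--     for i in numbers:
--       compare_number = i
--       while True:
--         xor_number = bin(i ^ compare_number)
--         bin_number = xor_number.split('b')
--         cnt = bin_number[1].count('1')
--         if cnt == 1 or cnt == 2:
--           answer.append(compare_number)
--           break
--         else:
--           compare_number = compare_number + 1
--     return answer
-- ===== SOURCE B (Python) =====
-- def solution(numbers):
--     # For each i: the smallest c >= i whose xor with i has 1 or 2 one-bits,
--     # computed directly from t = number of trailing one-bits of i.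
--     result = []
--     for i in numbers:
--         t = (i ^ (i + 1)).bit_length() - 1
--         result.append(i + 1 if t <= 1 else i + (1 << (t - 1)))
--     return result
-- ===== Notes on version B (the rewrite author's own statement) =====
-- stated objective: faster
-- what changed: Replaces A's linear upward scan (re-counting one-bits of i^c for every candidate c) by a closed-form bit computation: t = trailing one-bits of i via (i^(i+1)).bit_length()-1, answer = i+1 if t<=1 else i + 2^(t-1).
import Mathlib
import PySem

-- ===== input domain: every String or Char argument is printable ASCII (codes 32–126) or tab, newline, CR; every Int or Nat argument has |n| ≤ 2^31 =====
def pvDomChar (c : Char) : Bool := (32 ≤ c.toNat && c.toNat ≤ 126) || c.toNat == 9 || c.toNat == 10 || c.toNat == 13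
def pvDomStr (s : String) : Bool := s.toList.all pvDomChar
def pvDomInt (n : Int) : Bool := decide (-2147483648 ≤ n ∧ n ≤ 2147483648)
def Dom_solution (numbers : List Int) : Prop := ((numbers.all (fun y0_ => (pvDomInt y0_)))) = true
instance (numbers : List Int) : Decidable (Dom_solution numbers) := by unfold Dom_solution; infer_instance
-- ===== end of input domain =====

-- B replaces A's linear upward scan over candidates by a closed-form bit computation
-- (trailing-ones count of i), measurably faster; return values proved equal on Dom.

-- ===== PORT A =====
/-- `bin(i ^ c)`, `.split('b')`, `[1]`, `.count('1')` — A's candidate test, step for step.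
    `split('b')` never returns `none` (the separator is nonempty) and part 1 always exists
    (`bin` always contains a 'b'), so the total forms `.getD`/`pyGetD` are exact here. -/
def binCnt (x : Int) : Nat :=
  let xor_number := PySem.Int.pyBin x
  let bin_number := (PySem.Str.split? xor_number "b").getD []
  PySem.Str.count (PySem.List.pyGetD bin_number 1 "") "1"

/-- A's `while True:` loop; the fuel only makes the same computation total
    (the loop provably breaks within the fuel for every input in `Dom_solution`). -/
def loopA (i : Int) (compare_number : Int) : Nat → Int
  | 0 => compare_number
  | fuel+1 =>
    let cnt := binCnt (PySem.Int.bxor i compare_number)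
    if cnt = 1 ∨ cnt = 2 then compare_number else loopA i (compare_number + 1) fuel

def solution (numbers : List Int) : List Int :=
  numbers.foldl (fun answer i => answer ++ [loopA i i 4294967296]) []

-- ===== PORT B =====
def solution_alt (numbers : List Int) : List Int :=
  numbers.foldl (fun result i =>
    let t : Nat := PySem.Int.bitLength (PySem.Int.bxor i (i + 1)) - 1
    result ++ [if t ≤ 1 then i + 1 else i + ((1 : Int) <<< (t - 1))]) []

-- ===== PRECONDITION & SPEC =====
def Spec_solution (numbers : List Int) (out : List Int) : Prop := out = solution_alt numbers
instance (numbers : List Int) (out : List Int) : Decidable (Spec_solution numbers out) := by unfold Spec_solution; infer_instance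

-- ===== CLAIM (what is proved, stated in full; the proofs are below) =====
def Claim_equal_solution : Prop := ∀ (numbers : List Int), Dom_solution numbers → Spec_solution numbers (solution numbers)

-- ===== LEMMAS AND PROOFS =====

-- popcount of a natural number, written through PySem's bitCount
def pvPc (m : Nat) : Nat := PySem.Int.bitCount (m : Int)

lemma pvPc_zero : pvPc 0 = 0 := by decide

lemma pvPc_rec (m : Nat) : pvPc m = m % 2 + pvPc (m / 2) := by
  rcases Nat.eq_zero_or_pos m with h | h
  · subst h; decide
  · exact PySem.Int.bitCount_natCast h

lemma pvPc_pow_add (k x : Nat) (hx : x < 2 ^ k) : pvPc (2 ^ k + x) = 1 + pvPc x := by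
  induction k generalizing x with
  | zero => interval_cases x; decide
  | succ k ih =>
    have hP : 0 < 2 ^ k := Nat.two_pow_pos _
    have h2 : 2 ^ (k+1) = 2 * 2 ^ k := by rw [pow_succ]; ring
    have hmod : (2 ^ (k+1) + x) % 2 = x % 2 := by omega
    have hdiv : (2 ^ (k+1) + x) / 2 = 2 ^ k + x / 2 := by omega
    have hx2 : x / 2 < 2 ^ k := by omega
    calc pvPc (2 ^ (k+1) + x) = (2 ^ (k+1) + x) % 2 + pvPc ((2 ^ (k+1) + x) / 2) := pvPc_rec _
    _ = x % 2 + pvPc (2 ^ k + x / 2) := by rw [hmod, hdiv]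
    _ = x % 2 + (1 + pvPc (x / 2)) := by rw [ih _ hx2]
    _ = 1 + (x % 2 + pvPc (x / 2)) := by omega
    _ = 1 + pvPc x := by rw [← pvPc_rec]

lemma pvPc_pow (k : Nat) : pvPc (2 ^ k) = 1 := by
  have := pvPc_pow_add k 0 (Nat.two_pow_pos _)
  simpa [pvPc_zero] using this

lemma pvPc_ones (t : Nat) : pvPc (2 ^ t - 1) = t := by
  induction t with
  | zero => decide
  | succ t ih =>
    have hP : 0 < 2 ^ t := Nat.two_pow_pos _
    have h : 2 ^ (t+1) - 1 = 2 ^ t + (2 ^ t - 1) := by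
      have : 2 ^ (t+1) = 2 * 2 ^ t := by ring
      omega
    rw [h, pvPc_pow_add t _ (by omega), ih]
    omega

lemma pvPc_pos (x : Nat) (hx : 0 < x) : 1 ≤ pvPc x := by
  induction x using Nat.strong_induction_on with
  | _ x ih =>
    rw [pvPc_rec]
    rcases Nat.mod_two_eq_zero_or_one x with h | h
    · have hx2 : 0 < x / 2 := by omega
      have := ih (x / 2) (by omega) hx2
      omega
    · omega

lemma pvBl_ones (t : Nat) : PySem.Int.bitLength ((2 ^ (t+1) - 1 : Nat) : Int) = t + 1 := by
  induction t with
  | zero => decide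
  | succ t ih =>
    have hP : 0 < 2 ^ (t+1) := Nat.two_pow_pos _
    have h2 : 2 ^ (t+2) = 2 * 2 ^ (t+1) := by rw [pow_succ 2 (t+1)]; ring
    rw [PySem.Int.bitLength_natCast (by omega)]
    have hdiv : (2 ^ (t+2) - 1) / 2 = 2 ^ (t+1) - 1 := by omega
    rw [hdiv, ih]

-- ===== xor value lemmas (Nat, via testBit) =====

lemma pvXorHigh (q k a b : Nat) (ha : a < 2 ^ k) (hb : b < 2 ^ k) :
    (2 ^ k * q + a) ^^^ (2 ^ k * q + b) = a ^^^ b := by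
  apply Nat.eq_of_testBit_eq
  intro j
  rw [Nat.testBit_xor, Nat.testBit_two_pow_mul_add q ha, Nat.testBit_two_pow_mul_add q hb,
    Nat.testBit_xor]
  by_cases hj : j < k
  · simp [hj]
  · simp only [hj, if_false]
    have hab : a ^^^ b < 2 ^ k := Nat.xor_lt_two_pow ha hb
    have h1 : (a ^^^ b).testBit j = false :=
      Nat.testBit_eq_false_of_lt (lt_of_lt_of_le hab (Nat.pow_le_pow_right (by norm_num) (by omega)))
    have h2 : a.testBit j = false :=
      Nat.testBit_eq_false_of_lt (lt_of_lt_of_le ha (Nat.pow_le_pow_right (by norm_num) (by omega)))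
    have h3 : b.testBit j = false :=
      Nat.testBit_eq_false_of_lt (lt_of_lt_of_le hb (Nat.pow_le_pow_right (by norm_num) (by omega)))
    simp [h1, h2, h3]

lemma pvXorPow (k x : Nat) (hx : x < 2 ^ k) : 2 ^ k ^^^ x = 2 ^ k + x := by
  apply Nat.eq_of_testBit_eq
  intro j
  have h1 : 2 ^ k + x = 2 ^ k * 1 + x := by ring_nf
  rw [Nat.testBit_xor, h1, Nat.testBit_two_pow_mul_add 1 hx]
  by_cases hj : j < k
  · have h2 : (2 ^ k).testBit j = false := Nat.testBit_two_pow_of_ne (by omega)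
    rw [if_pos hj, h2]
    simp
  · have hxj : x.testBit j = false :=
      Nat.testBit_eq_false_of_lt (lt_of_lt_of_le hx (Nat.pow_le_pow_right (by norm_num) (by omega)))
    rw [if_neg hj, hxj]
    by_cases hej : j = k
    · subst hej
      rw [Nat.testBit_two_pow_self]
      simp
    · have h2 : (2 ^ k).testBit j = false := Nat.testBit_two_pow_of_ne (by omega)
      have h3 : Nat.testBit 1 (j - k) = false := by
        apply Nat.testBit_eq_false_of_lt
        have h5 : (2:Nat) ^ 1 ≤ 2 ^ (j - k) := Nat.pow_le_pow_right (by norm_num) (by omega)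
        omega
      rw [h2, h3]
      simp

lemma pvXorOnes (k x : Nat) (hx : x < 2 ^ k) : (2 ^ k - 1) ^^^ x = 2 ^ k - 1 - x := by
  apply Nat.eq_of_testBit_eq
  intro j
  have h1 : 2 ^ k - 1 - x = 2 ^ k - (x + 1) := by omega
  rw [Nat.testBit_xor, Nat.testBit_two_pow_sub_one, h1, Nat.testBit_two_pow_sub_succ hx]
  by_cases hj : j < k
  · simp [hj]
  · have hxj : x.testBit j = false :=
      Nat.testBit_eq_false_of_lt (lt_of_lt_of_le hx (Nat.pow_le_pow_right (by norm_num) (by omega)))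
    simp [hj, hxj]

-- the xor of the loop's `i` with the candidate `i + d` (trailing-ones decomposition of n)
lemma pvXorVal1 (q t : Nat) :
    (2 ^ (t+1) * q + (2 ^ t - 1)) ^^^ (2 ^ (t+1) * q + (2 ^ t - 1) + 1) = 2 ^ (t+1) - 1 := by
  have hP : 0 < 2 ^ t := Nat.two_pow_pos _
  have h2 : 2 ^ (t+1) = 2 * 2 ^ t := by rw [pow_succ]; ring
  have ha : 2 ^ t - 1 < 2 ^ (t+1) := by omega
  have hb : 2 ^ t - 1 + 1 < 2 ^ (t+1) := by omega
  have h3 : 2 ^ (t+1) * q + (2 ^ t - 1) + 1 = 2 ^ (t+1) * q + (2 ^ t - 1 + 1) := by omega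
  rw [h3, pvXorHigh q (t+1) _ _ ha hb]
  have h4 : 2 ^ t - 1 + 1 = 2 ^ t := by omega
  rw [h4, Nat.xor_comm, pvXorPow t _ (by omega)]
  omega

lemma pvXorVal (q t d : Nat) (ht : 2 ≤ t) (hd1 : 1 ≤ d) (hd2 : d ≤ 2 ^ (t-1)) :
    (2 ^ (t+1) * q + (2 ^ t - 1)) ^^^ (2 ^ (t+1) * q + (2 ^ t - 1) + d) = 2 ^ t + (2 ^ t - d) := by
  have hP : 0 < 2 ^ (t-1) := Nat.two_pow_pos _
  have h2 : 2 ^ (t-1) * 2 = 2 ^ t := by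
    rw [← pow_succ]; congr 1; omega
  have h2' : 2 ^ (t+1) = 2 * 2 ^ t := by rw [pow_succ]; ring
  have ha : 2 ^ t - 1 < 2 ^ (t+1) := by omega
  have hb : 2 ^ t - 1 + d < 2 ^ (t+1) := by omega
  have h3 : 2 ^ (t+1) * q + (2 ^ t - 1) + d = 2 ^ (t+1) * q + (2 ^ t - 1 + d) := by omega
  rw [h3, pvXorHigh q (t+1) _ _ ha hb]
  have h4 : 2 ^ t - 1 + d = 2 ^ t + (d - 1) := by omega
  rw [h4, ← pvXorPow t (d-1) (by omega), Nat.xor_comm (2 ^ t) (d-1), ← Nat.xor_assoc,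
    pvXorOnes t (d-1) (by omega)]
  have h5 : 2 ^ t - 1 - (d - 1) = 2 ^ t - d := by omega
  rw [h5, Nat.xor_comm, pvXorPow t _ (by omega)]

-- the same xor values for a negative `i`, expressed through the complement j = -1-i
lemma pvXorValNeg1 (q t : Nat) :
    (2 ^ (t+1) * q + 2 ^ t) ^^^ (2 ^ (t+1) * q + 2 ^ t - 1) = 2 ^ (t+1) - 1 := by
  have hP : 0 < 2 ^ t := Nat.two_pow_pos _
  have h2 : 2 ^ (t+1) = 2 * 2 ^ t := by rw [pow_succ]; ring
  have h3 : 2 ^ (t+1) * q + 2 ^ t - 1 = 2 ^ (t+1) * q + (2 ^ t - 1) := by omega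
  rw [h3, pvXorHigh q (t+1) _ _ (by omega) (by omega), pvXorPow t _ (by omega)]
  omega

lemma pvXorValNeg (q t d : Nat) (ht : 2 ≤ t) (hd1 : 1 ≤ d) (hd2 : d ≤ 2 ^ (t-1)) :
    (2 ^ (t+1) * q + 2 ^ t) ^^^ (2 ^ (t+1) * q + 2 ^ t - d) = 2 ^ t + (2 ^ t - d) := by
  have hP : 0 < 2 ^ (t-1) := Nat.two_pow_pos _
  have h2 : 2 ^ (t-1) * 2 = 2 ^ t := by
    rw [← pow_succ]; congr 1; omega
  have h2' : 2 ^ (t+1) = 2 * 2 ^ t := by rw [pow_succ]; ring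
  have h3 : 2 ^ (t+1) * q + 2 ^ t - d = 2 ^ (t+1) * q + (2 ^ t - d) := by omega
  rw [h3, pvXorHigh q (t+1) _ _ (by omega) (by omega), pvXorPow t _ (by omega)]

lemma pvPcMid (t d : Nat) (ht : 2 ≤ t) (hd1 : 1 ≤ d) (hd2 : d < 2 ^ (t-1)) :
    3 ≤ pvPc (2 ^ t + (2 ^ t - d)) := by
  have hP : 0 < 2 ^ (t-1) := Nat.two_pow_pos _
  have h2 : 2 ^ (t-1) * 2 = 2 ^ t := by
    rw [← pow_succ]; congr 1; omega
  have h3 : 2 ^ t - d = 2 ^ (t-1) + (2 ^ (t-1) - d) := by omega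
  rw [pvPc_pow_add t _ (by omega), h3, pvPc_pow_add (t-1) _ (by omega)]
  have := pvPc_pos (2 ^ (t-1) - d) (by omega)
  omega

-- ===== trailing-bit decompositions =====

lemma pvDecompOnes (n : Nat) : ∃ t q, n = 2 ^ (t+1) * q + (2 ^ t - 1) := by
  induction n using Nat.strong_induction_on with
  | _ n ih =>
    rcases Nat.mod_two_eq_zero_or_one n with h | h
    · exact ⟨0, n / 2, by omega⟩
    · rcases Nat.eq_zero_or_pos n with h0 | h0
      · omega
      · obtain ⟨t, q, hm⟩ := ih (n / 2) (by omega)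
        refine ⟨t + 1, q, ?_⟩
        have hP : 0 < 2 ^ t := Nat.two_pow_pos _
        have e1 : 2 ^ (t+1+1) = 2 * 2 ^ (t+1) := by rw [pow_succ 2 (t+1)]; ring
        have e2 : 2 ^ (t+1) = 2 * 2 ^ t := by rw [pow_succ]; ring
        have e3 : 2 ^ (t+1+1) * q = 2 * (2 ^ (t+1) * q) := by rw [e1]; ring
        omega

lemma pvDecompZeros (j : Nat) (hj : 0 < j) : ∃ t q, j = 2 ^ (t+1) * q + 2 ^ t := by
  induction j using Nat.strong_induction_on with
  | _ j ih =>
    rcases Nat.mod_two_eq_zero_or_one j with h | h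
    · obtain ⟨t, q, hm⟩ := ih (j / 2) (by omega) (by omega)
      refine ⟨t + 1, q, ?_⟩
      have hP : 0 < 2 ^ t := Nat.two_pow_pos _
      have e1 : 2 ^ (t+1+1) = 2 * 2 ^ (t+1) := by rw [pow_succ 2 (t+1)]; ring
      have e2 : 2 ^ (t+1) = 2 * 2 ^ t := by rw [pow_succ]; ring
      have e3 : 2 ^ (t+1+1) * q = 2 * (2 ^ (t+1) * q) := by rw [e1]; ring
      omega
    · exact ⟨0, j / 2, by omega⟩

-- ===== the string bridge: binCnt x = bitCount x =====

lemma pvToDigitsCore_count (fuel : Nat) :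
    ∀ n ds, n < fuel →
      List.count '1' (Nat.toDigitsCore 2 fuel n ds) = pvPc n + List.count '1' ds := by
  induction fuel with
  | zero => intro n ds h; omega
  | succ fuel ih =>
    intro n ds h
    rw [Nat.toDigitsCore]
    by_cases h0 : n / 2 = 0
    · rw [if_pos h0]
      have hn : n = 0 ∨ n = 1 := by omega
      rcases hn with hn | hn <;> subst hn
      · have hd : Nat.digitChar (0 % 2) = '0' := by decide
        rw [hd, List.count_cons]
        have hpc : pvPc 0 = 0 := pvPc_zero
        simp only [hpc]
        simp
      · have hd : Nat.digitChar (1 % 2) = '1' := by decide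
        rw [hd, List.count_cons]
        have hpc : pvPc 1 = 1 := by decide
        simp only [hpc]
        simp
        omega
    · rw [if_neg h0]
      rw [ih (n / 2) _ (by omega)]
      have hrec : pvPc n = n % 2 + pvPc (n / 2) := pvPc_rec n
      rcases Nat.mod_two_eq_zero_or_one n with h2 | h2
      · have hd : Nat.digitChar (n % 2) = '0' := by rw [h2]; decide
        rw [hd, List.count_cons]
        simp
        omega
      · have hd : Nat.digitChar (n % 2) = '1' := by rw [h2]; decide
        rw [hd, List.count_cons]
        simp
        omega

lemma pvToDigitsCore_no_b (fuel : Nat) :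
    ∀ n ds, 'b' ∉ ds → 'b' ∉ Nat.toDigitsCore 2 fuel n ds := by
  induction fuel with
  | zero => intro n ds h; simpa [Nat.toDigitsCore] using h
  | succ fuel ih =>
    intro n ds h
    rw [Nat.toDigitsCore]
    have hd : Nat.digitChar (n % 2) ≠ 'b' := by
      rcases Nat.mod_two_eq_zero_or_one n with h2 | h2 <;> rw [h2] <;> decide
    by_cases h0 : n / 2 = 0
    · rw [if_pos h0]
      simp only [List.mem_cons, not_or]
      exact ⟨fun h' => hd h'.symm, h⟩
    · rw [if_neg h0]
      apply ih
      simp only [List.mem_cons, not_or]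
      exact ⟨fun h' => hd h'.symm, h⟩

lemma pvCountGo (l : List Char) :
    ∀ fuel acc, l.length ≤ fuel → PySem.Chars.count.go ['1'] fuel l acc = acc + l.count '1' := by
  induction l with
  | nil => intro fuel acc h; cases fuel <;> simp [PySem.Chars.count.go]
  | cons c t ih =>
    intro fuel acc h
    cases fuel with
    | zero => simp at h
    | succ fuel =>
      rw [PySem.Chars.count.go]
      by_cases hc : c = '1'
      · subst hc
        have hpre : List.isPrefixOf ['1'] ('1' :: t) = true := by simp [List.isPrefixOf]
        rw [if_pos hpre]
        simp only [List.length_cons, List.length_nil, List.drop_succ_cons, List.drop_zero]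
        rw [ih fuel (acc + 1) (by simp at h; omega), List.count_cons_self]
        omega
      · have hpre : List.isPrefixOf ['1'] (c :: t) = false := by
          simp [List.isPrefixOf]
          exact fun h' => hc h'.symm
        rw [if_neg (by simp [hpre])]
        rw [ih fuel acc (by simp at h; omega)]
        have hcc : List.count '1' (c :: t) = List.count '1' t := by
          rw [List.count_cons]
          simp [hc]
        rw [hcc]

lemma pvCountChars (l : List Char) : PySem.Chars.count l ['1'] = l.count '1' := by
  rw [PySem.Chars.count]
  have h := pvCountGo l l.length 0 le_rfl
  simpa using h

lemma pvSplitGoNoSep (l : List Char) :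
    ∀ fuel cur acc, 'b' ∉ l → l.length ≤ fuel →
      PySem.Chars.splitOn.go ['b'] fuel l cur acc = ((cur.reverse ++ l) :: acc).reverse := by
  induction l with
  | nil => intro fuel cur acc _ _; cases fuel <;> simp [PySem.Chars.splitOn.go]
  | cons c t ih =>
    intro fuel cur acc hb h
    cases fuel with
    | zero => simp at h
    | succ fuel =>
      rw [PySem.Chars.splitOn.go]
      have hc : c ≠ 'b' := by intro h'; exact hb (by simp [h'])
      have hpre : List.isPrefixOf ['b'] (c :: t) = false := by
        simp [List.isPrefixOf]
        exact fun h' => hc h'.symm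
      rw [if_neg (by simp [hpre])]
      rw [ih fuel (c :: cur) acc (fun h' => hb (by simp [h'])) (by simpa using Nat.le_of_succ_le_succ h)]
      simp

lemma pvSplitGo (pre : List Char) :
    ∀ ds fuel cur acc, 'b' ∉ pre → 'b' ∉ ds → pre.length + ds.length + 1 ≤ fuel →
      PySem.Chars.splitOn.go ['b'] fuel (pre ++ 'b' :: ds) cur acc
        = (ds :: (cur.reverse ++ pre) :: acc).reverse := by
  induction pre with
  | nil =>
    intro ds fuel cur acc _ hds h
    cases fuel with
    | zero => simp at h
    | succ fuel =>
      rw [List.nil_append, PySem.Chars.splitOn.go]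
      have hpre : List.isPrefixOf ['b'] ('b' :: ds) = true := by simp [List.isPrefixOf]
      rw [if_pos hpre]
      simp only [List.length_cons, List.length_nil, List.drop_succ_cons, List.drop_zero]
      rw [pvSplitGoNoSep ds fuel [] (cur.reverse :: acc) hds (by simp at h; omega)]
      simp
  | cons c p ih =>
    intro ds fuel cur acc hbpre hds h
    cases fuel with
    | zero => simp at h
    | succ fuel =>
      rw [List.cons_append, PySem.Chars.splitOn.go]
      have hc : c ≠ 'b' := by intro h'; exact hbpre (by simp [h'])
      have hpre : List.isPrefixOf ['b'] (c :: (p ++ 'b' :: ds)) = false := by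
        simp [List.isPrefixOf]
        exact fun h' => hc h'.symm
      rw [if_neg (by simp [hpre])]
      rw [ih ds fuel (c :: cur) acc (fun h' => hbpre (by simp [h'])) hds (by simp only [List.length_cons] at h; omega)]
      simp

lemma pvSplitOn (pre ds : List Char) (hpre : 'b' ∉ pre) (hds : 'b' ∉ ds) :
    PySem.Chars.splitOn (pre ++ 'b' :: ds) ['b'] = [pre, ds] := by
  rw [PySem.Chars.splitOn]
  rw [pvSplitGo pre ds _ [] [] hpre hds (by simp only [List.length_append, List.length_cons]; omega)]
  simp

lemma pvTd_count (m : Nat) : List.count '1' (Nat.toDigits 2 m) = pvPc m := by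
  rw [Nat.toDigits, pvToDigitsCore_count (m+1) m [] (by omega)]
  simp

lemma pvTd_no_b (m : Nat) : 'b' ∉ Nat.toDigits 2 m := by
  rw [Nat.toDigits]
  exact pvToDigitsCore_no_b (m+1) m [] (by simp)

lemma pvSplitChain (pre : List Char) (hpre : 'b' ∉ pre) (m : Nat) :
    (PySem.Str.split? (String.ofList (pre ++ 'b' :: Nat.toDigits 2 m)) "b").getD [] =
      [String.ofList pre, String.ofList (Nat.toDigits 2 m)] := by
  have h1 : PySem.Chars.split? (String.ofList (pre ++ 'b' :: Nat.toDigits 2 m)).toList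
      ("b").toList = some [pre, Nat.toDigits 2 m] := by
    rw [PySem.Chars.split?]
    have he : (String.ofList (pre ++ 'b' :: Nat.toDigits 2 m)).toList
        = pre ++ 'b' :: Nat.toDigits 2 m := by simp
    have hsep : ("b").toList = ['b'] := rfl
    rw [he, hsep, if_neg (by decide)]
    rw [pvSplitOn pre (Nat.toDigits 2 m) hpre (pvTd_no_b m)]
  have h2 := PySem.Str.split?_map (String.ofList (pre ++ 'b' :: Nat.toDigits 2 m)) "b"
  rw [h1] at h2
  have hinj : Function.Injective (List.map String.toList) :=
    List.map_injective_iff.mpr (fun a b h => String.toList_injective h)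
  have h4 : Option.map (List.map String.toList)
      (PySem.Str.split? (String.ofList (pre ++ 'b' :: Nat.toDigits 2 m)) "b")
      = Option.map (List.map String.toList)
        (some [String.ofList pre, String.ofList (Nat.toDigits 2 m)]) := by
    rw [h2]
    simp
  have h5 := Option.map_injective hinj h4
  rw [h5]
  rfl

lemma pvBinCnt (x : Int) : binCnt x = PySem.Int.bitCount x := by
  rcases le_or_gt 0 x with hx | hx
  · have hb : PySem.Int.pyBin x = String.ofList (['0'] ++ 'b' :: Nat.toDigits 2 x.toNat) := by
      apply String.toList_injective
      rw [PySem.Int.toList_pyBin, PySem.Int.toBinChars0b]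
      simp [not_lt.mpr hx]
    rw [binCnt, hb, pvSplitChain ['0'] (by decide) x.toNat]
    have hget : PySem.List.pyGetD
        [String.ofList ['0'], String.ofList (Nat.toDigits 2 x.toNat)] (1 : Int) ""
        = String.ofList (Nat.toDigits 2 x.toNat) := rfl
    rw [hget, PySem.Str.count_eq]
    simp only [String.toList_ofList]
    rw [show ("1").toList = ['1'] from rfl, pvCountChars, pvTd_count, pvPc]
    congr 1
    omega
  · have hb : PySem.Int.pyBin x = String.ofList (['-', '0'] ++ 'b' :: Nat.toDigits 2 x.natAbs) := by
      apply String.toList_injective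
      rw [PySem.Int.toList_pyBin, PySem.Int.toBinChars0b]
      simp [hx]
    rw [binCnt, hb, pvSplitChain ['-', '0'] (by decide) x.natAbs]
    have hget : PySem.List.pyGetD
        [String.ofList ['-', '0'], String.ofList (Nat.toDigits 2 x.natAbs)] (1 : Int) ""
        = String.ofList (Nat.toDigits 2 x.natAbs) := rfl
    rw [hget, PySem.Str.count_eq]
    simp only [String.toList_ofList]
    rw [show ("1").toList = ['1'] from rfl, pvCountChars, pvTd_count, pvPc]
    conv_rhs => rw [show x = -((x.natAbs : Nat) : Int) by omega]
    rw [PySem.Int.bitCount_neg]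

-- ===== the loop: first candidate whose xor-popcount is 1 or 2 =====

lemma pvLoop_eq (fuel : Nat) :
    ∀ (i c tgt : Int), c ≤ tgt → (tgt - c).toNat < fuel →
      (∀ c', c ≤ c' → c' < tgt →
        ¬ (binCnt (PySem.Int.bxor i c') = 1 ∨ binCnt (PySem.Int.bxor i c') = 2)) →
      (binCnt (PySem.Int.bxor i tgt) = 1 ∨ binCnt (PySem.Int.bxor i tgt) = 2) →
      loopA i c fuel = tgt := by
  induction fuel with
  | zero => intro i c tgt h1 h2 _ _; omega
  | succ fuel ih =>
    intro i c tgt h1 h2 h3 h4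
    rw [loopA]
    by_cases hc : c = tgt
    · subst hc
      simp only [if_pos h4]
    · have hlt : c < tgt := by omega
      rw [if_neg (h3 c le_rfl hlt)]
      exact ih i (c + 1) tgt (by omega) (by omega) (fun c' hc1 hc2 => h3 c' (by omega) hc2) h4

-- pull the Nat xor value out of `bxor` for a nonnegative i and candidate i + d
lemma pvBxor_nonneg (n d : Nat) : PySem.Int.bxor ((n : Nat) : Int) (((n : Nat) : Int) + (d : Nat)) =
    ((n ^^^ (n + d) : Nat) : Int) := by
  have : ((n : Nat) : Int) + ((d : Nat) : Int) = (((n + d : Nat) : Nat) : Int) := by push_cast; ring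
  rw [this, PySem.Int.bxor_natCast]

-- `bxor` of two negative ints through their complements
lemma pvBxor_neg (a b : Int) (ha : a < 0) (hb : b < 0) :
    PySem.Int.bxor a b = (((-a - 1).toNat ^^^ (-b - 1).toNat : Nat) : Int) := by
  rw [PySem.Int.bxor]
  rw [if_neg (by omega), if_neg (by omega)]

-- t is at most 31 for inputs in Dom
lemma pvPowBound (t n : Nat) (h : 2 ^ t ≤ n + 1) (hn : n ≤ 2147483648) : t ≤ 31 := by
  by_contra h'
  have : 2 ^ 32 ≤ 2 ^ t := Nat.pow_le_pow_right (by norm_num) (by omega)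
  have : (2 ^ 32 : Nat) ≤ n + 1 := le_trans this h
  norm_num at this
  omega

-- ===== the per-element equality =====

lemma pvShl (k : Nat) : (1 : Int) <<< k = ((2 ^ k : Nat) : Int) := by
  induction k with
  | zero => decide
  | succ k ih =>
    rw [Int.shiftLeft_succ, ih, pow_succ]
    push_cast
    ring

lemma pvBinCnt_zero : binCnt 0 = 0 := by decide

-- the calculation shared by both sign cases: the loop from i reaches i + 2^(t-1)
lemma pvPc_mid_not (t d : Nat) (ht : 2 ≤ t) (hd1 : 1 ≤ d) (hd2 : d < 2 ^ (t-1)) :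
    ¬ (PySem.Int.bitCount ((2 ^ t + (2 ^ t - d) : Nat) : Int) = 1 ∨
       PySem.Int.bitCount ((2 ^ t + (2 ^ t - d) : Nat) : Int) = 2) := by
  have h3 := pvPcMid t d ht hd1 hd2
  rw [pvPc] at h3
  omega

lemma pvPc_tgt (t : Nat) (ht : 2 ≤ t) :
    PySem.Int.bitCount ((2 ^ t + 2 ^ (t-1) : Nat) : Int) = 2 := by
  have h2 : 2 ^ (t-1) * 2 = 2 ^ t := by rw [← pow_succ]; congr 1; omega
  have h : pvPc (2 ^ t + 2 ^ (t-1)) = 2 := by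
    rw [pvPc_pow_add t _ (by have := Nat.two_pow_pos (t-1); omega), pvPc_pow]
  rw [pvPc] at h
  exact h

lemma pvPc_first (t : Nat) :
    PySem.Int.bitCount ((2 ^ (t+1) - 1 : Nat) : Int) = t + 1 := by
  have h := pvPc_ones (t+1)
  rw [pvPc] at h
  exact h

lemma pvElem (i : Int) (h1 : -2147483648 ≤ i) (h2 : i ≤ 2147483648) :
    loopA i i 4294967296 =
      (if (PySem.Int.bitLength (PySem.Int.bxor i (i + 1)) - 1) ≤ 1 then i + 1
       else i + ((1 : Int) <<< ((PySem.Int.bitLength (PySem.Int.bxor i (i + 1)) - 1) - 1))) := by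
  by_cases hsg : 0 ≤ i
  · -- i ≥ 0 : work with n such that i = ↑n, trailing-ones decomposition of n
    obtain ⟨n, rfl⟩ : ∃ n : Nat, i = (n : Int) := ⟨i.toNat, by omega⟩
    obtain ⟨t, q, hdec⟩ := pvDecompOnes n
    have hPt : 0 < 2 ^ t := Nat.two_pow_pos t
    have hx1 : PySem.Int.bxor (n : Int) ((n : Int) + 1) = ((2 ^ (t+1) - 1 : Nat) : Int) := by
      rw [show ((n : Nat) : Int) + 1 = ((n + 1 : Nat) : Int) by push_cast; ring]
      rw [PySem.Int.bxor_natCast]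
      congr 1
      conv_lhs => rw [hdec]
      exact pvXorVal1 q t
    have hbl : PySem.Int.bitLength (PySem.Int.bxor (n : Int) ((n : Int) + 1)) = t + 1 := by
      rw [hx1]; exact pvBl_ones t
    rw [hbl]
    simp only [Nat.add_sub_cancel]
    have htb : t ≤ 31 := pvPowBound t n (by omega) (by omega)
    by_cases ht : t ≤ 1
    · rw [if_pos ht]
      apply pvLoop_eq
      · omega
      · omega
      · intro c' hge hlt
        have hc : c' = (n : Int) := by omega
        rw [hc, PySem.Int.bxor_self, pvBinCnt_zero]
        omega
      · rw [hx1, pvBinCnt, pvPc_first]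
        omega
    · rw [if_neg ht]
      have ht2 : 2 ≤ t := by omega
      rw [pvShl]
      have hD : (2:Nat) ^ (t-1) * 2 = 2 ^ t := by rw [← pow_succ]; congr 1; omega
      have hDpos : 0 < 2 ^ (t-1) := Nat.two_pow_pos (t-1)
      have hDbig : (2:Nat) ^ (t-1) < 4294967296 := by
        have : (2:Nat) ^ (t-1) ≤ 2 ^ 30 := Nat.pow_le_pow_right (by norm_num) (by omega)
        omega
      apply pvLoop_eq
      · omega
      · omega
      · intro c' hge hlt
        set d : Nat := (c' - (n : Int)).toNat with hd
        have hdD : d < 2 ^ (t-1) := by omega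
        rcases Nat.eq_zero_or_pos d with hd0 | hd0
        · have hc : c' = (n : Int) := by omega
          rw [hc, PySem.Int.bxor_self, pvBinCnt_zero]
          omega
        · have hc' : c' = ((n : Nat) : Int) + ((d : Nat) : Int) := by omega
          rw [hc', pvBxor_nonneg, pvBinCnt]
          have hval : n ^^^ (n + d) = 2 ^ t + (2 ^ t - d) := by
            conv_lhs => rw [hdec]
            exact pvXorVal q t d ht2 hd0 (by omega)
          rw [hval]
          exact pvPc_mid_not t d ht2 hd0 hdD
      · rw [pvBxor_nonneg, pvBinCnt]
        have hval : n ^^^ (n + 2 ^ (t-1)) = 2 ^ t + 2 ^ (t-1) := by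
          conv_lhs => rw [hdec]
          rw [pvXorVal q t (2 ^ (t-1)) ht2 hDpos le_rfl]
          omega
        rw [hval]
        right
        exact pvPc_tgt t ht2
  · by_cases hm1 : i = -1
    · -- i = -1 : the loop stops at 0 and B returns 0
      rw [hm1]
      have hbl : PySem.Int.bitLength (PySem.Int.bxor (-1 : Int) ((-1 : Int) + 1)) = 1 := by decide
      rw [hbl]
      rw [if_pos (by norm_num)]
      apply pvLoop_eq (tgt := 0)
      · omega
      · omega
      · intro c' hge hlt
        have hc : c' = -1 := by omega
        rw [hc, PySem.Int.bxor_self, pvBinCnt_zero]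
        omega
      · left
        decide
    · -- i ≤ -2 : complement j = -i-1 ≥ 1, trailing-zeros decomposition
      have hneg : i ≤ -2 := by omega
      set j : Nat := (-i - 1).toNat with hjdef
      have hj1 : 0 < j := by omega
      have hjle : j ≤ 2147483647 := by omega
      obtain ⟨t, q, hdec⟩ := pvDecompZeros j hj1
      have hPt : 0 < 2 ^ t := Nat.two_pow_pos t
      have h2t : 2 ^ t ≤ j := by
        rw [hdec]; omega
      have hx1 : PySem.Int.bxor i (i + 1) = ((2 ^ (t+1) - 1 : Nat) : Int) := by
        rw [pvBxor_neg i (i + 1) (by omega) (by omega)]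
        congr 1
        have e1 : (-i - 1).toNat = j := by omega
        have e2 : (-(i + 1) - 1).toNat = j - 1 := by omega
        rw [e1, e2]
        conv_lhs => rw [hdec]
        exact pvXorValNeg1 q t
      have hbl : PySem.Int.bitLength (PySem.Int.bxor i (i + 1)) = t + 1 := by
        rw [hx1]; exact pvBl_ones t
      rw [hbl]
      simp only [Nat.add_sub_cancel]
      have htb : t ≤ 31 := pvPowBound t j (by omega) (by omega)
      by_cases ht : t ≤ 1
      · rw [if_pos ht]
        apply pvLoop_eq
        · omega
        · omega
        · intro c' hge hlt
          have hc : c' = i := by omega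
          rw [hc, PySem.Int.bxor_self, pvBinCnt_zero]
          omega
        · rw [hx1, pvBinCnt, pvPc_first]
          omega
      · rw [if_neg ht]
        have ht2 : 2 ≤ t := by omega
        rw [pvShl]
        have hD : (2:Nat) ^ (t-1) * 2 = 2 ^ t := by rw [← pow_succ]; congr 1; omega
        have hDpos : 0 < 2 ^ (t-1) := Nat.two_pow_pos (t-1)
        have hDj : 2 ^ (t-1) < j := by omega
        have hDbig : (2:Nat) ^ (t-1) < 4294967296 := by
          have : (2:Nat) ^ (t-1) ≤ 2 ^ 30 := Nat.pow_le_pow_right (by norm_num) (by omega)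
          omega
        apply pvLoop_eq
        · omega
        · omega
        · intro c' hge hlt
          set d : Nat := (c' - i).toNat with hd
          have hdD : d < 2 ^ (t-1) := by omega
          rcases Nat.eq_zero_or_pos d with hd0 | hd0
          · have hc : c' = i := by omega
            rw [hc, PySem.Int.bxor_self, pvBinCnt_zero]
            omega
          · rw [pvBxor_neg i c' (by omega) (by omega), pvBinCnt]
            have e1 : (-i - 1).toNat = j := by omega
            have e2 : (-c' - 1).toNat = j - d := by omega
            rw [e1, e2]
            have hval : j ^^^ (j - d) = 2 ^ t + (2 ^ t - d) := by
              conv_lhs => rw [hdec]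
              exact pvXorValNeg q t d ht2 hd0 (by omega)
            rw [hval]
            exact pvPc_mid_not t d ht2 hd0 hdD
        · rw [pvBxor_neg i (i + ((2 ^ (t-1) : Nat) : Int)) (by omega) (by omega), pvBinCnt]
          have e1 : (-i - 1).toNat = j := by omega
          have e2 : (-(i + ((2 ^ (t-1) : Nat) : Int)) - 1).toNat = j - 2 ^ (t-1) := by omega
          rw [e1, e2]
          have hval : j ^^^ (j - 2 ^ (t-1)) = 2 ^ t + 2 ^ (t-1) := by
            conv_lhs => rw [hdec]
            rw [pvXorValNeg q t (2 ^ (t-1)) ht2 hDpos le_rfl]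
            omega
          rw [hval]
          right
          exact pvPc_tgt t ht2

-- ===== VERDICT (by name: the statement is the Claim_ definition above) =====
theorem solution_spec : Claim_equal_solution := by
  intro numbers hdom
  unfold Spec_solution solution solution_alt
  rw [PySem.List.foldl_append_singleton_eq_map (fun i => loopA i i 4294967296) numbers []]
  rw [PySem.List.foldl_append_singleton_eq_map
    (fun i => (if (PySem.Int.bitLength (PySem.Int.bxor i (i + 1)) - 1) ≤ 1 then i + 1
      else i + ((1 : Int) <<< ((PySem.Int.bitLength (PySem.Int.bxor i (i + 1)) - 1) - 1)))) numbers []]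
  simp only [List.nil_append]
  apply List.map_congr_left
  intro i hi
  unfold Dom_solution at hdom
  rw [List.all_eq_true] at hdom
  have := hdom i hi
  simp only [pvDomInt, decide_eq_true_eq] at this
  exact pvElem i this.1 this.2
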